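-- pv_equiv track=rewrite | github.com/MomentsLD/moments | moments/LD/Util.py | map_moment
-- ===== SOURCE A (Python) =====
-- mom_map = {}
--
-- def map_moment(mom):
--     """
--     There are repeated moments with equal expectations, so we collapse them into
--     the same moment.
--
--     :param str mom: The moment to map to its "canonical" name.
--     """
--     try:
--         return mom_map[mom]
--     except KeyError:
--         if mom.split("_")[0] == "DD":
--             pops = sorted([int(p) for p in mom.split("_")[1:]])
--             mom_out = "DD_" + "_".join([str(p) for p in pops])
--             mom_map[mom] = mom_out
--         elif mom.split("_")[0] == "Dz":
--             popD = mom.split("_")[1]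
--             popsz = sorted([int(p) for p in mom.split("_")[2:]])
--             mom_out = "Dz_" + popD + "_" + "_".join([str(p) for p in popsz])
--             mom_map[mom] = mom_out
--         elif mom.split("_")[0] == "pi2":
--             popsp = sorted([int(p) for p in mom.split("_")[1:3]])
--             popsq = sorted([int(p) for p in mom.split("_")[3:]])
--             ## pi2_2_2_1_1 -> pi2_1_1_2_2
--             ## pi2_1_2_1_1 -> pi2_1_1_1_2,
--             ## pi2_2_2_1_3 -> pi2_1_3_2_2
--             if popsp[0] > popsq[0]:  # switch them
--                 mom_out = (
--                     "pi2_"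
--                     + "_".join([str(p) for p in popsq])
--                     + "_"
--                     + "_".join([str(p) for p in popsp])
--                 )
--             elif popsp[0] == popsq[0] and popsp[1] > popsq[1]:  # switch them
--                 mom_out = (
--                     "pi2_"
--                     + "_".join([str(p) for p in popsq])
--                     + "_"
--                     + "_".join([str(p) for p in popsp])
--                 )
--             else:
--                 mom_out = (
--                     "pi2_"
--                     + "_".join([str(p) for p in popsp])
--                     + "_"
--                     + "_".join([str(p) for p in popsq])
--                 )
--             mom_map[mom] = mom_out
--         elif mom.split("_")[0] == "H":
--             pops = sorted([int(p) for p in mom.split("_")[1:]])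
--             mom_out = "H_" + "_".join([str(p) for p in pops])
--             mom_map[mom] = mom_out
--         else:
--             mom_out = mom
--         mom_map[mom] = mom_out
--         return mom_map[mom]
-- ===== SOURCE B (Python) =====
-- mom_map = {}
--
-- # prefix -> (number of fixed leading fields after the prefix,
-- #            slice bounds of the trailing groups to sort)
-- _SPEC = {
--     "DD": (0, [(0, None)]),
--     "Dz": (1, [(0, None)]),
--     "pi2": (0, [(0, 2), (2, None)]),
--     "H": (0, [(0, None)]),
-- }
--
--
-- def map_moment(mom):
--     """Canonicalize a moment name: one table-driven generic path sorts each
--     trailing group of population indices and then the groups themselves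
--     (lexicographically), instead of per-prefix branches."""
--     try:
--         return mom_map[mom]
--     except KeyError:
--         pass
--     fields = mom.split("_")
--     spec = _SPEC.get(fields[0])
--     if spec is None:
--         out = mom
--     else:
--         nfixed, cuts = spec
--         rest = fields[1 + nfixed:]
--         groups = sorted(sorted(int(p) for p in rest[a:b]) for a, b in cuts)
--         out = "_".join(fields[:1 + nfixed]) + "_" + "_".join(
--             str(p) for g in groups for p in g
--         )
--     mom_map[mom] = out
--     return out
-- ===== Notes on version B (the rewrite author's own statement) =====
-- stated objective: simpler
-- what changed: B replaces A's four per-prefix branches by one table-driven generic path: a prefix -> (fixed fields, group slices) table, each trailing group sorted and then the list of groups itself sorted lexicographically, so A's explicit three-way pi2 comparison and per-branch string building disappear.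
-- outside the precondition, e.g. on map_moment('Dz'): A raises IndexError, B returns 'Dz_'; on map_moment('pi2'): A raises IndexError, B returns 'pi2_'; on map_moment('pi2_1_1_1'): A raises IndexError, B returns 'pi2_1_1_1'
import Mathlib
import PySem

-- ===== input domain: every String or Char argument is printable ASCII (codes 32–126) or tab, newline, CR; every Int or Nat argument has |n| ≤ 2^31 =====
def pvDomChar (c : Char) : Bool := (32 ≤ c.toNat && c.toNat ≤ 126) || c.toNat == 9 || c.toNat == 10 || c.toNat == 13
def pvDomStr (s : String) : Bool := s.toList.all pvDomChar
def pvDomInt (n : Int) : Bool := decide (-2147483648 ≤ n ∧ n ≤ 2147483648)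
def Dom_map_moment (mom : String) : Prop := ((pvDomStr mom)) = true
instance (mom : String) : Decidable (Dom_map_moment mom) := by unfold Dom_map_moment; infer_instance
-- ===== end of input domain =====

-- B replaces A's per-prefix branch chain by one table-driven generic path: a prefix → (fixed
-- fields, group slices) table, each group sorted and then the groups themselves sorted
-- lexicographically (objective: simpler). Python's module-level dict mom_map is pure memoization
-- (the cached value is the value computed on the miss), so both ports compute the uncached
-- RETURN value; the cache side effect is not modelled.

-- ===== PORT A =====
-- mom.split("_"): the separator "_" is nonempty, so PySem.Str.split? is always `some`
-- and `.getD []` is never the default.  int(p) → (PySem.Int.ofStr? p).getD 0 and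
-- popsq[1] → PySem.List.pyGetD popsq 1 0: Pre_ guarantees the parse succeeds and the
-- index is in range exactly where Python evaluates them.
def map_moment (mom : String) : String :=
  if PySem.List.pyGetD ((PySem.Str.split? mom "_").getD []) 0 "" = "DD" then
    let pops := PySem.List.sorted ((PySem.List.slice ((PySem.Str.split? mom "_").getD []) (some 1) none).map (fun p => (PySem.Int.ofStr? p).getD 0)) (fun x => x) false
    "DD_" ++ PySem.Str.join "_" (pops.map (fun p => PySem.Int.toStr p))
  else if PySem.List.pyGetD ((PySem.Str.split? mom "_").getD []) 0 "" = "Dz" then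
    let popD := PySem.List.pyGetD ((PySem.Str.split? mom "_").getD []) 1 ""
    let popsz := PySem.List.sorted ((PySem.List.slice ((PySem.Str.split? mom "_").getD []) (some 2) none).map (fun p => (PySem.Int.ofStr? p).getD 0)) (fun x => x) false
    "Dz_" ++ popD ++ "_" ++ PySem.Str.join "_" (popsz.map (fun p => PySem.Int.toStr p))
  else if PySem.List.pyGetD ((PySem.Str.split? mom "_").getD []) 0 "" = "pi2" then
    let popsp := PySem.List.sorted ((PySem.List.slice ((PySem.Str.split? mom "_").getD []) (some 1) (some 3)).map (fun p => (PySem.Int.ofStr? p).getD 0)) (fun x => x) false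
    let popsq := PySem.List.sorted ((PySem.List.slice ((PySem.Str.split? mom "_").getD []) (some 3) none).map (fun p => (PySem.Int.ofStr? p).getD 0)) (fun x => x) false
    if PySem.List.pyGetD popsp 0 0 > PySem.List.pyGetD popsq 0 0 then
      "pi2_" ++ PySem.Str.join "_" (popsq.map (fun p => PySem.Int.toStr p)) ++ "_" ++ PySem.Str.join "_" (popsp.map (fun p => PySem.Int.toStr p))
    else if PySem.List.pyGetD popsp 0 0 = PySem.List.pyGetD popsq 0 0 ∧ PySem.List.pyGetD popsp 1 0 > PySem.List.pyGetD popsq 1 0 then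
      "pi2_" ++ PySem.Str.join "_" (popsq.map (fun p => PySem.Int.toStr p)) ++ "_" ++ PySem.Str.join "_" (popsp.map (fun p => PySem.Int.toStr p))
    else
      "pi2_" ++ PySem.Str.join "_" (popsp.map (fun p => PySem.Int.toStr p)) ++ "_" ++ PySem.Str.join "_" (popsq.map (fun p => PySem.Int.toStr p))
  else if PySem.List.pyGetD ((PySem.Str.split? mom "_").getD []) 0 "" = "H" then
    let pops := PySem.List.sorted ((PySem.List.slice ((PySem.Str.split? mom "_").getD []) (some 1) none).map (fun p => (PySem.Int.ofStr? p).getD 0)) (fun x => x) false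
    "H_" ++ PySem.Str.join "_" (pops.map (fun p => PySem.Int.toStr p))
  else
    mom

-- ===== PORT B =====
-- the module-level _SPEC table: prefix → (nfixed, slice bounds of the trailing groups)
def pvSpecTable : PySem.Dict String (Int × List (Option Int × Option Int)) :=
  PySem.Dict.mk
    [("DD", (0, [(some 0, none)])),
     ("Dz", (1, [(some 0, none)])),
     ("pi2", (0, [(some 0, some 2), (some 2, none)])),
     ("H", (0, [(some 0, none)]))]

-- Python's sorted of a list of int-lists compares lists lexicographically with a strict
-- prefix smaller; Lean's List.lt on List Int (List.Lex (· < ·)) is exactly that order.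
def map_moment_alt (mom : String) : String :=
  let fields := (PySem.Str.split? mom "_").getD []
  match PySem.Dict.get? pvSpecTable (PySem.List.pyGetD fields 0 "") with
  | none => mom
  | some (nfixed, cuts) =>
    let rest := PySem.List.slice fields (some (1 + nfixed)) none
    let groups := PySem.List.sorted
      (cuts.map (fun c => PySem.List.sorted ((PySem.List.slice rest c.1 c.2).map (fun p => (PySem.Int.ofStr? p).getD 0)) (fun x => x) false))
      (fun g => g) false
    PySem.Str.join "_" (PySem.List.slice fields none (some (1 + nfixed))) ++ "_" ++
      PySem.Str.join "_" ((groups.flatMap (fun g => g)).map (fun p => PySem.Int.toStr p))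

-- ===== PRECONDITION & SPEC =====
-- Pre_ excludes exactly the inputs on which the Python A raises: a recognized prefix with a
-- non-integer population field (ValueError from int), a "Dz" with no second field (IndexError),
-- and a "pi2" with fewer than four fields, or exactly four whose smaller leading pair equals the
-- last field so that popsq[1] is read (IndexError).
def Pre_map_moment (mom : String) : Prop :=
  let fs := (PySem.Str.split? mom "_").getD []
  (PySem.List.pyGetD fs 0 "" = "DD" → ∀ p ∈ fs.drop 1, (PySem.Int.ofStr? p).isSome = true) ∧
  (PySem.List.pyGetD fs 0 "" = "H" → ∀ p ∈ fs.drop 1, (PySem.Int.ofStr? p).isSome = true) ∧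
  (PySem.List.pyGetD fs 0 "" = "Dz" → 2 ≤ fs.length ∧ ∀ p ∈ fs.drop 2, (PySem.Int.ofStr? p).isSome = true) ∧
  (PySem.List.pyGetD fs 0 "" = "pi2" →
    4 ≤ fs.length ∧ (∀ p ∈ fs.drop 1, (PySem.Int.ofStr? p).isSome = true) ∧
    (fs.length = 4 →
      min ((PySem.Int.ofStr? (PySem.List.pyGetD fs 1 "")).getD 0) ((PySem.Int.ofStr? (PySem.List.pyGetD fs 2 "")).getD 0)
        ≠ (PySem.Int.ofStr? (PySem.List.pyGetD fs 3 "")).getD 0))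
instance (mom : String) : Decidable (Pre_map_moment mom) := by unfold Pre_map_moment; infer_instance

def pvWitness_map_moment : String := "pi2_2_2_1_1"

def Spec_map_moment (mom : String) (out : String) : Prop := out = map_moment_alt mom
instance (mom : String) (out : String) : Decidable (Spec_map_moment mom out) := by unfold Spec_map_moment; infer_instance

-- ===== CLAIM (what is proved, stated in full; the proofs are below) =====
def Claim_equal_map_moment : Prop := ∀ (mom : String), Dom_map_moment mom → Pre_map_moment mom → Spec_map_moment mom (map_moment mom)

-- ===== LEMMAS AND PROOFS =====

lemma chars_join_append (sep : List Char) (xs ys : List (List Char)) (hx : xs ≠ []) (hy : ys ≠ []) :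
    PySem.Chars.join sep (xs ++ ys) = PySem.Chars.join sep xs ++ sep ++ PySem.Chars.join sep ys := by
  induction xs with
  | nil => exact absurd rfl hx
  | cons a as ih =>
    cases as with
    | nil =>
      cases ys with
      | nil => exact absurd rfl hy
      | cons b bs =>
        simp [PySem.Chars.join_singleton, PySem.Chars.join_cons_cons]
    | cons a2 as2 =>
      simp only [List.cons_append]
      rw [PySem.Chars.join_cons_cons, PySem.Chars.join_cons_cons, ← List.cons_append,
        ih (by simp)]
      simp [List.append_assoc]

lemma str_join_append (xs ys : List String) (hx : xs ≠ []) (hy : ys ≠ []) :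
    PySem.Str.join "_" (xs ++ ys) = PySem.Str.join "_" xs ++ "_" ++ PySem.Str.join "_" ys := by
  apply String.toList_inj.mp
  simp only [PySem.Str.toList_join, String.toList_append, List.map_append]
  exact chars_join_append _ _ _ (by simpa) (by simpa)

lemma str_join_singleton (s : String) : PySem.Str.join "_" [s] = s := by
  apply String.toList_inj.mp
  simp [PySem.Str.toList_join, PySem.Chars.join_singleton]

lemma sorted_singleton {α : Type} [LT α] [DecidableEq α] [(a b : α) → Decidable (a < b)]
    (x : α) : PySem.List.sorted [x] (fun v => v) false = [x] := by
  simp [PySem.List.sorted_eq_foldl_insertBy, PySem.List.insertBy]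

lemma sorted_pair {α : Type} [LT α] [(a b : α) → Decidable (a < b)] (x y : α) :
    PySem.List.sorted [x, y] (fun v => v) false = if y < x then [y, x] else [x, y] := by
  simp [PySem.List.sorted_eq_foldl_insertBy, PySem.List.insertBy]

lemma head_cons (fs : List String) (h : String) (hne : h ≠ "") (hh : PySem.List.pyGetD fs 0 "" = h) :
    ∃ t, fs = h :: t := by
  cases fs with
  | nil => simp [PySem.List.pyGetD, PySem.List.pyGet?] at hh; exact absurd hh.symm (Ne.symm hne)
  | cons a t => exact ⟨t, by rw [PySem.List.pyGetD_zero_cons] at hh; rw [hh]⟩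

lemma not_lex_head (a b c : Int) (qs : List Int) (h : a < c) : ¬ ((c :: qs : List Int) < [a, b]) := by
  intro hl
  cases hl with
  | rel h' => omega
  | cons h' => omega

lemma not_lex_tie (a b d : Int) (ds : List Int) (h : b ≤ d) : ¬ ((a :: d :: ds : List Int) < [a, b]) := by
  intro hl
  cases hl with
  | rel h' => omega
  | cons h' =>
    cases h' with
    | rel h'' => omega
    | cons h'' => cases h''

-- ===== VERDICT (by name: the statement is the Claim_ definition above) =====
theorem map_moment_spec : Claim_equal_map_moment := by
  intro mom hdom hpre
  unfold Spec_map_moment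
  simp only [Pre_map_moment] at hpre
  simp only [map_moment, map_moment_alt]
  generalize hg : (PySem.Str.split? mom "_").getD [] = fs at hpre ⊢
  obtain ⟨hDD, hH, hDz, hpi⟩ := hpre
  by_cases h0 : PySem.List.pyGetD fs 0 "" = "DD"
  · obtain ⟨t, rfl⟩ := head_cons fs "DD" (by decide) h0
    rw [h0]
    rw [if_pos rfl]
    rw [show PySem.Dict.get? pvSpecTable "DD" = some ((0:Int), [((some 0 : Option Int), (none : Option Int))]) from rfl]
    simp only [List.flatMap_cons, List.flatMap_nil, List.append_nil, sorted_singleton, List.map_cons, List.map_nil]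
    rw [show ((1:Int) + 0) = 1 from rfl]
    rw [PySem.List.slice_from_one]
    simp only [List.tail_cons, PySem.List.slice_zero_start, PySem.List.slice_none_none]
    rw [PySem.List.slice_to _ (by norm_num : (0:Int) ≤ 1)]
    simp only [Int.toNat_one, List.take_succ_cons, List.take_zero]
    rw [str_join_singleton]
    rfl
  by_cases h1 : PySem.List.pyGetD fs 0 "" = "Dz"
  · obtain ⟨hlen, hints⟩ := hDz h1
    obtain ⟨t0, rfl⟩ := head_cons fs "Dz" (by decide) h1
    obtain ⟨f1, t, rfl⟩ : ∃ f1 t, t0 = f1 :: t := by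
      cases t0 with
      | nil => simp at hlen
      | cons f1 t => exact ⟨f1, t, rfl⟩
    rw [h1]
    rw [if_neg (by decide), if_pos rfl]
    rw [show PySem.Dict.get? pvSpecTable "Dz" = some ((1:Int), [((some 0 : Option Int), (none : Option Int))]) from rfl]
    simp only [List.flatMap_cons, List.flatMap_nil, List.append_nil, sorted_singleton, List.map_cons, List.map_nil]
    rw [show ((1:Int) + 1) = 2 from rfl]
    rw [PySem.List.slice_from _ (by norm_num : (0:Int) ≤ 2)]
    simp only [PySem.List.slice_zero_start, PySem.List.slice_none_none]
    rw [PySem.List.slice_to _ (by norm_num : (0:Int) ≤ 2)]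
    simp only [show ((2:Int)).toNat = 2 from rfl, List.drop_succ_cons, List.drop_zero,
      List.take_succ_cons, List.take_zero]
    rw [show (["Dz", f1] : List String) = ["Dz"] ++ [f1] from rfl,
      str_join_append _ _ (by simp) (by simp), str_join_singleton, str_join_singleton]
    rw [PySem.List.pyGetD_ofNat']
    rfl
  by_cases h2 : PySem.List.pyGetD fs 0 "" = "pi2"
  · obtain ⟨hlen, hints, htie⟩ := hpi h2
    obtain ⟨t0, rfl⟩ := head_cons fs "pi2" (by decide) h2
    obtain ⟨f1, f2, f3, t, rfl⟩ : ∃ f1 f2 f3 t, t0 = f1 :: f2 :: f3 :: t := by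
      match t0, hlen with
      | a :: b :: c :: t, _ => exact ⟨a, b, c, t, rfl⟩
    rw [h2]
    rw [if_neg (by decide), if_neg (by decide), if_pos rfl]
    rw [show PySem.Dict.get? pvSpecTable "pi2" = some ((0:Int), [((some 0 : Option Int), (some 2 : Option Int)), ((some 2 : Option Int), (none : Option Int))]) from rfl]
    simp only [List.map_cons, List.map_nil]
    rw [show ((1:Int) + 0) = 1 from rfl]
    rw [PySem.List.slice_from_one]
    simp only [List.tail_cons, PySem.List.slice_zero_start]
    rw [PySem.List.slice_to ("pi2" :: f1 :: f2 :: f3 :: t) (by norm_num : (0:Int) ≤ 1)]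
    rw [PySem.List.slice_to (f1 :: f2 :: f3 :: t) (by norm_num : (0:Int) ≤ 2)]
    rw [PySem.List.slice_from (f1 :: f2 :: f3 :: t) (by norm_num : (0:Int) ≤ 2)]
    rw [PySem.List.slice_toNat ("pi2" :: f1 :: f2 :: f3 :: t) (by norm_num : (0:Int) ≤ 1) (by norm_num : (0:Int) ≤ 3)]
    rw [PySem.List.slice_from ("pi2" :: f1 :: f2 :: f3 :: t) (by norm_num : (0:Int) ≤ 3)]
    simp only [Int.toNat_one, show ((2:Int)).toNat = 2 from rfl, show ((3:Int)).toNat = 3 from rfl,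
      List.drop_succ_cons, List.drop_zero, List.take_succ_cons, List.take_zero]
    simp only [List.map_cons, List.map_nil]
    rw [str_join_singleton]
    have htie' : t = [] → min ((PySem.Int.ofStr? f1).getD 0) ((PySem.Int.ofStr? f2).getD 0)
        ≠ (PySem.Int.ofStr? f3).getD 0 := by
      intro ht
      subst ht
      have h4 : (("pi2" :: [f1, f2, f3] : List String)).length = 4 := rfl
      have := htie h4
      simpa [pysem] using this
    obtain ⟨a, b, hp, hmin⟩ : ∃ a b, PySem.List.sorted [(PySem.Int.ofStr? f1).getD 0, (PySem.Int.ofStr? f2).getD 0] (fun x => x) false = [a, b] ∧ min ((PySem.Int.ofStr? f1).getD 0) ((PySem.Int.ofStr? f2).getD 0) = a := by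
      by_cases hxy : (PySem.Int.ofStr? f2).getD 0 < (PySem.Int.ofStr? f1).getD 0
      · exact ⟨(PySem.Int.ofStr? f2).getD 0, (PySem.Int.ofStr? f1).getD 0,
          by rw [sorted_pair]; simp [hxy], by omega⟩
      · exact ⟨(PySem.Int.ofStr? f1).getD 0, (PySem.Int.ofStr? f2).getD 0,
          by rw [sorted_pair]; simp [hxy], by omega⟩
    obtain ⟨c, qs, hq⟩ : ∃ c qs, PySem.List.sorted ((PySem.Int.ofStr? f3).getD 0 :: List.map (fun p => (PySem.Int.ofStr? p).getD 0) t) (fun x => x) false = c :: qs := by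
      rcases hq0 : PySem.List.sorted ((PySem.Int.ofStr? f3).getD 0 :: List.map (fun p => (PySem.Int.ofStr? p).getD 0) t) (fun x => x) false with _ | ⟨c, qs⟩
      · exact absurd ((PySem.List.sorted_eq_nil_iff _ _ _).mp hq0) (by simp)
      · exact ⟨c, qs, rfl⟩
    have hqtie : qs = [] → a ≠ c := by
      intro hqs hac
      subst hqs
      have hlq := congrArg List.length hq
      rw [PySem.List.length_sorted] at hlq
      simp only [List.length_cons, List.length_map, List.length_nil] at hlq
      have ht : t = [] := by
        cases t with
        | nil => rfl
        | cons u us => simp at hlq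
      subst ht
      have hq' : ([(PySem.Int.ofStr? f3).getD 0] : List Int) = [c] := hq
      injection hq' with hz _
      exact htie' rfl (by rw [hmin, hac]; exact hz.symm)
    rw [hp, hq, sorted_pair]
    rw [PySem.List.pyGetD_zero_cons, PySem.List.pyGetD_zero_cons]
    have hb1 : PySem.List.pyGetD [a, b] 1 0 = b := rfl
    rw [hb1]
    by_cases hca : c < a
    · rw [if_pos (by omega : a > c)]
      rw [if_pos (show (c :: qs : List Int) < [a, b] from List.Lex.rel hca)]
      simp only [List.flatMap_cons, List.flatMap_nil, List.append_nil]
      rw [List.map_append, str_join_append _ _ (by simp) (by simp)]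
      rw [show ("pi2" ++ "_" : String) = "pi2_" from rfl]
      simp [String.append_assoc]
    · by_cases hac : a < c
      · rw [if_neg (by omega : ¬ a > c), if_neg (by intro h; exact absurd h.1 (by omega))]
        rw [if_neg (not_lex_head a b c qs hac)]
        simp only [List.flatMap_cons, List.flatMap_nil, List.append_nil]
        rw [List.map_append, str_join_append _ _ (by simp) (by simp)]
        rw [show ("pi2" ++ "_" : String) = "pi2_" from rfl]
        simp [String.append_assoc]
      · have hac' : a = c := by omega
        subst hac'
        cases qs with
        | nil => exact absurd rfl (hqtie rfl)
        | cons d ds =>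
          have hd1 : PySem.List.pyGetD (a :: d :: ds) 1 0 = d := by simp [pysem]
          rw [hd1]
          by_cases hdb : d < b
          · rw [if_neg (by omega : ¬ a > a), if_pos (⟨rfl, by omega⟩ : _ ∧ _)]
            rw [if_pos (show (a :: d :: ds : List Int) < [a, b] from List.Lex.cons (List.Lex.rel hdb))]
            simp only [List.flatMap_cons, List.flatMap_nil, List.append_nil]
            rw [List.map_append, str_join_append _ _ (by simp) (by simp)]
            rw [show ("pi2" ++ "_" : String) = "pi2_" from rfl]
            simp [String.append_assoc]
          · rw [if_neg (by omega : ¬ a > a), if_neg (by intro h; exact absurd h.2 (by omega))]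
            rw [if_neg (not_lex_tie a b d ds (by omega))]
            simp only [List.flatMap_cons, List.flatMap_nil, List.append_nil]
            rw [List.map_append, str_join_append _ _ (by simp) (by simp)]
            rw [show ("pi2" ++ "_" : String) = "pi2_" from rfl]
            simp [String.append_assoc]
  by_cases h3 : PySem.List.pyGetD fs 0 "" = "H"
  · obtain ⟨t, rfl⟩ := head_cons fs "H" (by decide) h3
    rw [h3]
    rw [if_neg (by decide), if_neg (by decide), if_neg (by decide), if_pos rfl]
    rw [show PySem.Dict.get? pvSpecTable "H" = some ((0:Int), [((some 0 : Option Int), (none : Option Int))]) from rfl]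
    simp only [List.flatMap_cons, List.flatMap_nil, List.append_nil, sorted_singleton, List.map_cons, List.map_nil]
    rw [show ((1:Int) + 0) = 1 from rfl]
    rw [PySem.List.slice_from_one]
    simp only [List.tail_cons, PySem.List.slice_zero_start, PySem.List.slice_none_none]
    rw [PySem.List.slice_to _ (by norm_num : (0:Int) ≤ 1)]
    simp only [Int.toNat_one, List.take_succ_cons, List.take_zero]
    rw [str_join_singleton]
    rfl
  · rw [if_neg h0, if_neg h1, if_neg h2, if_neg h3]
    have hnone : PySem.Dict.get? pvSpecTable (PySem.List.pyGetD fs 0 "") = none := by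
      simp [pvSpecTable, PySem.Dict.get?, beq_iff_eq, Ne.symm h0, Ne.symm h1, Ne.symm h2, Ne.symm h3]
    rw [hnone]
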